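-- pv_equiv track=rewrite | github.com/thepratholic/LeetCode-and-GFG-Daily-POTD | LeetCode/House Robber - IV.py | f
-- ===== SOURCE A (Python) =====
-- def f(nums, k, mid):
--     cnt = 0
--     i = 0
--     while i < len(nums):
--         if nums[i] <= mid:
--             cnt += 1
--             i += 2
--         else:
--             i += 1
--     return cnt >= k
-- ===== SOURCE B (Python) =====
-- def f(nums, k, mid):
--     prev2 = prev1 = 0
--     for x in nums:
--         cur = max(prev1, prev2 + (1 if x <= mid else 0))
--         prev2, prev1 = prev1, cur
--     return prev1 >= k
-- ===== Notes on version B (the rewrite author's own statement) =====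
-- stated objective: alternative
-- what changed: Replaced the greedy index-skipping while loop (count leftmost element <= mid, jump two ahead) by a per-element dynamic program maintaining prev2/prev1 best counts of non-adjacent picks; the proof shows the greedy count equals the DP maximum.
import Mathlib
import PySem

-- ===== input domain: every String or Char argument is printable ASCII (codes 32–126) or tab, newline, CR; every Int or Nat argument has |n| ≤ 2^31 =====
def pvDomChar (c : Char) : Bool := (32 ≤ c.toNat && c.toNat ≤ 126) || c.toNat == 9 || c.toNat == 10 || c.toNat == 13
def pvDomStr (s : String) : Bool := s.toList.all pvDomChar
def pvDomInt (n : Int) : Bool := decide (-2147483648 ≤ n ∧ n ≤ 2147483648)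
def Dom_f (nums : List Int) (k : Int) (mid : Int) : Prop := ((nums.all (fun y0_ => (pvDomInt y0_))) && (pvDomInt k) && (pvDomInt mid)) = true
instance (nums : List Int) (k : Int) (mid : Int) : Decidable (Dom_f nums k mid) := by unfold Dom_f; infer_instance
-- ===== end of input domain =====

-- B replaces A's greedy index-skipping scan by a prev2/prev1 dynamic program over the
-- elements (max count of non-adjacent picks ≤ mid); alternative algorithm, same cost.

-- ===== PORT A =====
-- A's while loop: cnt, i; if nums[i] <= mid then cnt += 1, i += 2 else i += 1.
def fLoop (nums : List Int) (mid : Int) (cnt : Int) (i : Nat) : Int :=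
  if h : i < nums.length then
    if nums[i] ≤ mid then fLoop nums mid (cnt + 1) (i + 2)
    else fLoop nums mid cnt (i + 1)
  else cnt
termination_by nums.length - i

def f (nums : List Int) (k : Int) (mid : Int) : Bool :=
  decide (fLoop nums mid 0 0 ≥ k)

-- ===== PORT B =====
-- one DP step: (prev2, prev1) ↦ (prev1, max prev1 (prev2 + (1 if x ≤ mid else 0)))
def fStep (mid : Int) (p : Int × Int) (x : Int) : Int × Int :=
  (p.2, max p.2 (p.1 + (if x ≤ mid then 1 else 0)))

def f_alt (nums : List Int) (k : Int) (mid : Int) : Bool :=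
  decide ((nums.foldl (fStep mid) (0, 0)).2 ≥ k)

-- ===== PRECONDITION & SPEC =====
def Spec_f (nums : List Int) (k : Int) (mid : Int) (out : Bool) : Prop := out = f_alt nums k mid
instance (nums : List Int) (k : Int) (mid : Int) (out : Bool) : Decidable (Spec_f nums k mid out) := by unfold Spec_f; infer_instance

-- ===== CLAIM (what is proved, stated in full; the proofs are below) =====
def Claim_equal_f : Prop := ∀ (nums : List Int) (k : Int) (mid : Int), Dom_f nums k mid → Spec_f nums k mid (f nums k mid)

-- ===== LEMMAS AND PROOFS =====

-- A's greedy count, as a structural function on the list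
def g (mid : Int) : List Int → Int
  | [] => 0
  | x :: zs => if x ≤ mid then 1 + g mid (zs.drop 1) else g mid zs
termination_by l => l.length
decreasing_by all_goals (simp only [List.length_drop, List.length_cons]; omega)

-- the right-to-left companion of B's DP: .1 pairs with prev2, .2 with prev1
def ab (mid : Int) : List Int → Int × Int
  | [] => (0, 0)
  | x :: zs => ((if x ≤ mid then 1 else 0) + (ab mid zs).2, max (ab mid zs).1 (ab mid zs).2)

theorem g_cons_eq (mid x : Int) (zs : List Int) :
    g mid (x :: zs) = if x ≤ mid then 1 + g mid (zs.drop 1) else g mid zs := by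
  rw [g]

-- dropping the head loses at most 1 and never gains
theorem g_mono (mid : Int) :
    ∀ (n : Nat) (zs : List Int), zs.length ≤ n →
      ∀ x, g mid zs ≤ g mid (x :: zs) ∧ g mid (x :: zs) ≤ 1 + g mid zs := by
  intro n
  induction n with
  | zero =>
      intro zs h x
      have hz : zs = [] := by cases zs <;> simp_all
      subst hz
      by_cases hx : x ≤ mid <;> simp [g, hx]
  | succ n ih =>
      intro zs h x
      cases zs with
      | nil => by_cases hx : x ≤ mid <;> simp [g, hx]
      | cons y ws =>
          have hws : ws.length ≤ n := by simp at h; omega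
          by_cases hx : x ≤ mid
          · constructor
            · -- g (y::ws) ≤ g (x::y::ws) = 1 + g ws
              by_cases hy : y ≤ mid
              · have h2 : g mid (ws.drop 1) ≤ g mid ws := by
                  cases ws with
                  | nil => simp
                  | cons w ws' => simpa using (ih ws' (by simp at hws ⊢; omega) w).1
                rw [g_cons_eq mid x, if_pos hx, g_cons_eq mid y, if_pos hy]
                simp only [List.drop_succ_cons, List.drop_zero]
                omega
              · have h2 := (ih ws hws y).2
                rw [g_cons_eq mid x, if_pos hx]
                simp only [List.drop_succ_cons, List.drop_zero]
                omega
            · -- g (x::y::ws) = 1 + g ws ≤ 1 + g (y::ws)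
              have h1 := (ih ws hws y).1
              rw [g_cons_eq mid x, if_pos hx]
              simp only [List.drop_succ_cons, List.drop_zero]
              omega
          · have h1 := (ih ws hws y).1
            have h2 := (ih ws hws y).2
            rw [g_cons_eq mid x, if_neg hx]
            constructor <;> omega

theorem g_cons_le (mid : Int) (x : Int) (zs : List Int) :
    g mid zs ≤ g mid (x :: zs) :=
  (g_mono mid zs.length zs le_rfl x).1

theorem g_cons_le' (mid : Int) (x : Int) (zs : List Int) :
    g mid (x :: zs) ≤ 1 + g mid zs :=
  (g_mono mid zs.length zs le_rfl x).2

theorem g_drop_le (mid : Int) (zs : List Int) : g mid zs ≤ 1 + g mid (zs.drop 1) := by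
  cases zs with
  | nil => simp [g]
  | cons w ws => simpa using g_cons_le' mid w ws

-- snd of ab is the greedy count of the tail; its max with fst is the greedy count
theorem ab_max_eq_g (mid : Int) :
    ∀ (n : Nat) (zs : List Int), zs.length ≤ n →
      max (ab mid zs).1 (ab mid zs).2 = g mid zs := by
  intro n
  induction n with
  | zero =>
      intro zs h
      have hz : zs = [] := by cases zs <;> simp_all
      subst hz; simp [ab, g]
  | succ n ih =>
      intro zs h
      cases zs with
      | nil => simp [ab, g]
      | cons x ws =>
          have hws : ws.length ≤ n := by simp at h; omega
          have hih := ih ws hws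
          cases ws with
          | nil =>
              by_cases hx : x ≤ mid <;> simp [ab, g, hx]
          | cons y vs =>
              have hvs : vs.length ≤ n := by simp at hws ⊢; omega
              have hih2 := ih vs hvs
              have hB : (ab mid (y :: vs)).2 = max (ab mid vs).1 (ab mid vs).2 := rfl
              rw [hih2] at hB
              have hih' : max (ab mid (y :: vs)).1 (g mid vs) = g mid (y :: vs) := by
                rw [← hB]; exact hih
              by_cases hx : x ≤ mid
              · have hle := g_cons_le' mid y vs
                show max ((if x ≤ mid then (1:Int) else 0) + (ab mid (y :: vs)).2)
                      (max (ab mid (y :: vs)).1 (ab mid (y :: vs)).2) = _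
                rw [if_pos hx, hB, g_cons_eq mid x, if_pos hx]
                simp only [List.drop_succ_cons, List.drop_zero]
                omega
              · have hle := g_cons_le mid y vs
                show max ((if x ≤ mid then (1:Int) else 0) + (ab mid (y :: vs)).2)
                      (max (ab mid (y :: vs)).1 (ab mid (y :: vs)).2) = _
                rw [if_neg hx, hB, g_cons_eq mid x, if_neg hx, g_cons_eq mid y]
                split_ifs with hy
                · rw [g_cons_eq mid y, if_pos hy] at hih'
                  have hd := g_drop_le mid vs
                  omega
                · rw [g_cons_eq mid y, if_neg hy] at hih'
                  omega

-- B's left-to-right fold from any lawful state computes the ab pair affinely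
theorem foldl_fStep (mid : Int) :
    ∀ (zs : List Int) (a b : Int), a ≤ b →
      (zs.foldl (fStep mid) (a, b)).2 = max (a + (ab mid zs).1) (b + (ab mid zs).2) := by
  intro zs
  induction zs with
  | nil => intro a b hab; simp [ab]; omega
  | cons x ws ih =>
      intro a b hab
      have hstep : fStep mid (a, b) x = (b, max b (a + (if x ≤ mid then 1 else 0))) := rfl
      have hle : b ≤ max b (a + (if x ≤ mid then 1 else 0)) := le_max_left _ _
      calc ((x :: ws).foldl (fStep mid) (a, b)).2
          = (ws.foldl (fStep mid) (b, max b (a + (if x ≤ mid then 1 else 0)))).2 := by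
            simp [List.foldl, hstep]
        _ = max (b + (ab mid ws).1)
              (max b (a + (if x ≤ mid then 1 else 0)) + (ab mid ws).2) := ih _ _ hle
        _ = max (a + (ab mid (x :: ws)).1) (b + (ab mid (x :: ws)).2) := by
            show _ = max (a + ((if x ≤ mid then (1:Int) else 0) + (ab mid ws).2))
                      (b + max (ab mid ws).1 (ab mid ws).2)
            omega

-- A's loop computes cnt + greedy count of the remaining suffix
theorem fLoop_eq (nums : List Int) (mid : Int) :
    ∀ (cnt : Int) (i : Nat), fLoop nums mid cnt i = cnt + g mid (nums.drop i) := by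
  intro cnt i
  induction cnt, i using fLoop.induct nums mid with
  | case1 cnt i h hle ih =>
      rw [fLoop]
      simp only [dif_pos h, if_pos hle, ih]
      rw [List.drop_eq_getElem_cons h, g_cons_eq, if_pos hle, List.drop_drop]
      have e2 : List.drop (i + 1 + 1) nums = List.drop (i + 2) nums := by
        congr 1
      rw [e2]
      omega
  | case2 cnt i h hle ih =>
      rw [fLoop]
      simp only [dif_pos h, if_neg hle, ih]
      rw [List.drop_eq_getElem_cons h, g_cons_eq, if_neg hle]
  | case3 cnt i h =>
      rw [fLoop]
      simp only [dif_neg h]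
      rw [List.drop_eq_nil_of_le (by omega)]
      simp [g]

theorem f_eq_g (nums : List Int) (k mid : Int) :
    f nums k mid = decide (g mid nums ≥ k) := by
  unfold f
  rw [fLoop_eq nums mid 0 0]
  simp

theorem f_alt_eq_g (nums : List Int) (k mid : Int) :
    f_alt nums k mid = decide (g mid nums ≥ k) := by
  unfold f_alt
  rw [foldl_fStep mid nums 0 0 le_rfl]
  have := ab_max_eq_g mid nums.length nums le_rfl
  simp only [zero_add]
  rw [this]

-- ===== VERDICT (by name: the statement is the Claim_ definition above) =====
theorem f_spec : Claim_equal_f := by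
  intro nums k mid _
  unfold Spec_f
  rw [f_eq_g, f_alt_eq_g]
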